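-- pv_equiv track=rewrite | github.com/alysivji/advent-of-code | 2022/day17_tetris.py | generate_shape
-- ===== SOURCE A (Python) =====
-- from typing import Iterator, NamedTuple
--
-- class GridPosition(NamedTuple):
--     row: int
--     col: int
--
--     def add(self, row: int, col: int) -> "GridPosition":
--         return GridPosition(row=self.row + row, col=self.col + col)
--
-- def generate_shape(shape_type: str, max_row: int) -> list[GridPosition]:
--     points = []
--     if shape_type == "horizontal_line":
--         for col in range(2, 6):
--             points.append(GridPosition(row=max_row + 4, col=col))
--     elif shape_type == "plus":
--         points.append(GridPosition(row=max_row + 4, col=3))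
--         for col in range(2, 5):
--             points.append(GridPosition(row=max_row + 5, col=col))
--         points.append(GridPosition(row=max_row + 6, col=3))
--     elif shape_type == "backwards_l":
--         for col in range(2, 4):
--             points.append(GridPosition(row=max_row + 4, col=col))
--         for row in range(max_row + 4, max_row + 7):
--             points.append(GridPosition(row=row, col=4))
--     elif shape_type == "vertical_line":
--         for row in range(max_row + 4, max_row + 8):
--             points.append(GridPosition(row=row, col=2))
--     elif shape_type == "box":
--         for col in range(2, 4):
--             points.append(GridPosition(row=max_row + 4, col=col))
--         for col in range(2, 4):
--             points.append(GridPosition(row=max_row + 5, col=col))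
--     else:
--         raise ValueError("unexpected shape_type")
--
--     return points
-- ===== SOURCE B (Python) =====
-- from typing import NamedTuple
--
-- class GridPosition(NamedTuple):
--     row: int
--     col: int
--
--     def add(self, row: int, col: int) -> "GridPosition":
--         return GridPosition(row=self.row + row, col=self.col + col)
--
-- # (row_delta, col) offsets in the exact emission order of the original branches
-- SHAPES = {
--     "horizontal_line": [(4, 2), (4, 3), (4, 4), (4, 5)],
--     "plus": [(4, 3), (5, 2), (5, 3), (5, 4), (6, 3)],
--     "backwards_l": [(4, 2), (4, 3), (4, 4), (5, 4), (6, 4)],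
--     "vertical_line": [(4, 2), (5, 2), (6, 2), (7, 2)],
--     "box": [(4, 2), (4, 3), (5, 2), (5, 3)],
-- }
--
-- def generate_shape(shape_type: str, max_row: int) -> list[GridPosition]:
--     if shape_type not in SHAPES:
--         raise ValueError("unexpected shape_type")
--     return [GridPosition(row=max_row + dr, col=c) for dr, c in SHAPES[shape_type]]
-- ===== Notes on version B (the rewrite author's own statement) =====
-- stated objective: idiomatic
-- what changed: Replaces the five hardcoded if/elif branches with their per-row loops by a module-level SHAPES table of (row_delta, col) offsets and one uniform comprehension; unknown shape types still raise ValueError.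
import Mathlib
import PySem

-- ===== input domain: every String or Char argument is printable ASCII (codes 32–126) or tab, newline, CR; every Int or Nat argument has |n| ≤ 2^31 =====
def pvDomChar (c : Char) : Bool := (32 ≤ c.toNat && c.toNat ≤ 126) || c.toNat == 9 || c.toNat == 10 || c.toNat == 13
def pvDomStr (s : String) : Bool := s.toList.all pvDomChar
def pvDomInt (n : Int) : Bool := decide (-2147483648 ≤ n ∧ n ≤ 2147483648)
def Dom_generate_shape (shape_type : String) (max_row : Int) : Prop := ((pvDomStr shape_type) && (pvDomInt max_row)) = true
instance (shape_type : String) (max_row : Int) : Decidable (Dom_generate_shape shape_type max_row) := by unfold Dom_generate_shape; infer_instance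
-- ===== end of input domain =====

-- B replaces the if/elif branches and their loops with a table of (row_delta, col) offsets and one uniform pass (idiomatic, same cost).

-- ===== PORT A =====
-- Literal transliteration of A: five branches, each appending via its loops (range → PySem.List.pyRange).
-- On an unknown shape_type A raises ValueError: that input is excluded by Pre_; the port returns [] there.
def generate_shape (shape_type : String) (max_row : Int) : List (Int × Int) :=
  if shape_type == "horizontal_line" then
    (PySem.List.pyRange 2 6 1).foldl (fun pts col => pts ++ [(max_row + 4, col)]) []
  else if shape_type == "plus" then
    let points : List (Int × Int) := [(max_row + 4, 3)]
    let points := (PySem.List.pyRange 2 5 1).foldl (fun pts col => pts ++ [(max_row + 5, col)]) points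
    points ++ [(max_row + 6, 3)]
  else if shape_type == "backwards_l" then
    let points := (PySem.List.pyRange 2 4 1).foldl (fun pts col => pts ++ [(max_row + 4, col)]) ([] : List (Int × Int))
    (PySem.List.pyRange (max_row + 4) (max_row + 7) 1).foldl (fun pts row => pts ++ [(row, 4)]) points
  else if shape_type == "vertical_line" then
    (PySem.List.pyRange (max_row + 4) (max_row + 8) 1).foldl (fun pts row => pts ++ [(row, 2)]) []
  else if shape_type == "box" then
    let points := (PySem.List.pyRange 2 4 1).foldl (fun pts col => pts ++ [(max_row + 4, col)]) ([] : List (Int × Int))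
    (PySem.List.pyRange 2 4 1).foldl (fun pts col => pts ++ [(max_row + 5, col)]) points
  else []  -- raise ValueError (outside Pre_)

-- ===== PORT B =====
-- The module-level SHAPES table of Source B, as an insertion-order association list.
def SHAPES : PySem.Dict String (List (Int × Int)) :=
  PySem.Dict.ofList [("horizontal_line", [(4, 2), (4, 3), (4, 4), (4, 5)]),
   ("plus", [(4, 3), (5, 2), (5, 3), (5, 4), (6, 3)]),
   ("backwards_l", [(4, 2), (4, 3), (4, 4), (5, 4), (6, 4)]),
   ("vertical_line", [(4, 2), (5, 2), (6, 2), (7, 2)]),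
   ("box", [(4, 2), (4, 3), (5, 2), (5, 3)])]

def generate_shape_alt (shape_type : String) (max_row : Int) : List (Int × Int) :=
  match SHAPES.get? shape_type with
  | none => []  -- raise ValueError (outside Pre_)
  | some offsets => offsets.map (fun p => (max_row + p.1, p.2))

-- ===== PRECONDITION & SPEC =====
-- A raises ValueError on any shape_type not among the five names; exactly those inputs are excluded.
def Pre_generate_shape (shape_type : String) (max_row : Int) : Prop :=
  shape_type = "horizontal_line" ∨ shape_type = "plus" ∨ shape_type = "backwards_l" ∨
  shape_type = "vertical_line" ∨ shape_type = "box"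
instance (shape_type : String) (max_row : Int) : Decidable (Pre_generate_shape shape_type max_row) := by unfold Pre_generate_shape; infer_instance
def pvWitness_generate_shape : String × Int := ("plus", 0)

def Spec_generate_shape (shape_type : String) (max_row : Int) (out : List (Int × Int)) : Prop := out = generate_shape_alt shape_type max_row
instance (shape_type : String) (max_row : Int) (out : List (Int × Int)) : Decidable (Spec_generate_shape shape_type max_row out) := by unfold Spec_generate_shape; infer_instance

-- ===== CLAIM (what is proved, stated in full; the proofs are below) =====
def Claim_equal_generate_shape : Prop := ∀ (shape_type : String) (max_row : Int), Dom_generate_shape shape_type max_row → Pre_generate_shape shape_type max_row → Spec_generate_shape shape_type max_row (generate_shape shape_type max_row)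

-- ===== LEMMAS AND PROOFS =====
lemma pyRange_2_6 : PySem.List.pyRange 2 6 1 = [2, 3, 4, 5] := by decide
lemma pyRange_2_5 : PySem.List.pyRange 2 5 1 = [2, 3, 4] := by decide
lemma pyRange_2_4 : PySem.List.pyRange 2 4 1 = [2, 3] := by decide

lemma pyRange_of_diff3 (a b : Int) (h : b - a = 3) :
    PySem.List.pyRange a b 1 = [a, a + 1, a + 2] := by
  rw [PySem.List.pyRange_one, h]
  simp [List.range_succ]

lemma pyRange_of_diff4 (a b : Int) (h : b - a = 4) :
    PySem.List.pyRange a b 1 = [a, a + 1, a + 2, a + 3] := by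
  rw [PySem.List.pyRange_one, h]
  simp [List.range_succ]

-- ===== VERDICT (by name: the statement is the Claim_ definition above) =====
theorem generate_shape_spec : Claim_equal_generate_shape := by
  intro shape_type max_row _ hpre
  unfold Spec_generate_shape
  rcases hpre with h | h | h | h | h <;> subst h <;>
    (simp only [generate_shape, generate_shape_alt]) <;>
    (rw [show SHAPES.get? _ = some _ from rfl]) <;>
    simp [pyRange_of_diff3 (max_row + 4) (max_row + 7) (by ring),
      pyRange_of_diff4 (max_row + 4) (max_row + 8) (by ring),
      pyRange_2_6, pyRange_2_5, pyRange_2_4] <;>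
    omega
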